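-- pv_equiv track=rewrite | github.com/egorcoders/for_nastya | film_list.py | find_free_place_for_f
-- ===== SOURCE A (Python) =====
-- def find_free_place_for_f(a: list, k: int) -> list:
--     c = []
--     for i in range(len(a)):
--         j = 0
--         while j < len(a[0]):
--             if a[i][j] == 0:
--                 count = 0
--                 while j < len(a[0]) and a[i][j] == 0:
--                     count += 1
--                     j += 1
--                 if count >= k:
--                     c.append(i + 1)
--                     break
--             else:
--                 j += 1
--     return c
-- ===== SOURCE B (Python) =====
-- def _runs(xs):
--     """Group xs into maximal runs of equal values, as (value, length) pairs."""
--     out = []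
--     for x in xs:
--         if out and out[-1][0] == x:
--             out[-1] = (x, out[-1][1] + 1)
--         else:
--             out.append((x, 1))
--     return out
--
--
-- def find_free_place_for_f(a: list, k: int) -> list:
--     w = len(a[0]) if a else 0
--     return [i + 1 for i, row in enumerate(a)
--             if any(v == 0 and n >= k for v, n in _runs(row[:w]))]
-- ===== Notes on version B (the rewrite author's own statement) =====
-- stated objective: idiomatic
-- what changed: A's manual index-walking nested while loops with a break are replaced by a group-into-runs pass per row (one fold building (value,length) runs of row[:len(a[0])]) followed by an any() test for a zero run of length >= k, with a list comprehension over enumerate(a).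
-- outside the precondition, e.g. on find_free_place_for_f([[0, 0, 0], [0, 1]], 1): A returns [1, 2], B returns [1, 2]
import Mathlib
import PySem

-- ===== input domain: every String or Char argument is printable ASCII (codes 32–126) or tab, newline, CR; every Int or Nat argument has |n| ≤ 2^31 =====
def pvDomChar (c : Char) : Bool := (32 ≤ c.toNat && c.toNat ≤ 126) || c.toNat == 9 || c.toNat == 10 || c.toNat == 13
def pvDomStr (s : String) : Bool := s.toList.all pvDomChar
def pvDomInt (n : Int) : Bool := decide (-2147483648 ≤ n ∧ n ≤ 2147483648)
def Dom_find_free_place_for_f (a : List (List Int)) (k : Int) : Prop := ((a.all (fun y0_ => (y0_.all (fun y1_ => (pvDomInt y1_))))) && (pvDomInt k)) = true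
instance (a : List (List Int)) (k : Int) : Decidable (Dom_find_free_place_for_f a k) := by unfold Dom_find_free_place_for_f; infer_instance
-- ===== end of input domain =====

-- B replaces A's index-walking nested while loops by a per-row "group into runs, then test" pass (idiomatic, same cost).

-- ===== PORT A =====
-- inner 'while j < len(a[0]) and a[i][j] == 0: count += 1; j += 1' (returns the final (j, count));
-- fuel only makes the loop total: it is called with fuel = w, at least the remaining iterations
def pvZerosA (row : List Int) (w : Nat) : Nat → Nat → Nat → Nat × Nat
  | 0, j, count => (j, count)
  | fuel + 1, j, count =>
    if j < w ∧ row.getD j 0 = 0 then pvZerosA row w fuel (j + 1) (count + 1)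
    else (j, count)

-- one row's 'while j < len(a[0])' loop; true iff 'c.append(i+1); break' is reached
-- (fuel = w + 1 bounds the iterations, j strictly increases each time round)
def pvRowA (row : List Int) (w : Nat) (k : Int) : Nat → Nat → Bool
  | 0, _ => false
  | fuel + 1, j =>
    if j < w then
      if row.getD j 0 = 0 then
        if k ≤ ((pvZerosA row w w j 0).2 : Int) then true
        else pvRowA row w k fuel (pvZerosA row w w j 0).1
      else pvRowA row w k fuel (j + 1)
    else false

def find_free_place_for_f (a : List (List Int)) (k : Int) : List Int :=
  (PySem.List.pyRange 0 a.length 1).foldl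
    (fun c i =>
      if pvRowA (PySem.List.pyGetD a i []) (PySem.List.pyGetD a 0 []).length k
           ((PySem.List.pyGetD a 0 []).length + 1) 0
      then c ++ [i + 1] else c) []

-- ===== PORT B =====
-- _runs: a fold grouping equal neighbours into (value, length) pairs
def pvRunsB (xs : List Int) : List (Int × Int) :=
  xs.foldl (fun out x =>
    match out.getLast? with
    | some p => if p.1 = x then out.dropLast ++ [(x, p.2 + 1)] else out ++ [(x, 1)]
    | none => out ++ [(x, 1)]) []

def find_free_place_for_f_alt (a : List (List Int)) (k : Int) : List Int :=
  (PySem.List.enumerate a).foldl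
    (fun res p =>
      if (pvRunsB (PySem.List.slice p.2 none
            (some (match a with | [] => (0 : Int) | r :: _ => (r.length : Int))))).any
            (fun r => r.1 == 0 && decide (k ≤ r.2))
      then res ++ [p.1 + 1] else res) []

-- ===== PRECONDITION & SPEC =====
-- Pre_ excludes ragged inputs having a row shorter than the first row: there A indexes past the row's
-- end and (except when an earlier qualifying zero run makes it break first) raises IndexError.
def Pre_find_free_place_for_f (a : List (List Int)) (_k : Int) : Prop :=
  ∀ r ∈ a, (a.headD []).length ≤ r.length
instance (a : List (List Int)) (k : Int) : Decidable (Pre_find_free_place_for_f a k) := by unfold Pre_find_free_place_for_f; infer_instance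

def pvWitness_find_free_place_for_f : List (List Int) × Int := ([[0, 0, 1], [1, 0, 0]], 2)

def Spec_find_free_place_for_f (a : List (List Int)) (k : Int) (out : List Int) : Prop := out = find_free_place_for_f_alt a k
instance (a : List (List Int)) (k : Int) (out : List Int) : Decidable (Spec_find_free_place_for_f a k out) := by unfold Spec_find_free_place_for_f; infer_instance

-- ===== CLAIM (what is proved, stated in full; the proofs are below) =====
def Claim_equal_find_free_place_for_f : Prop := ∀ (a : List (List Int)) (k : Int), Dom_find_free_place_for_f a k → Pre_find_free_place_for_f a k → Spec_find_free_place_for_f a k (find_free_place_for_f a k)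

-- ===== LEMMAS AND PROOFS =====

-- count of leading elements of the list equal to v
def pvCnt (v : Int) : List Int → Nat
  | [] => 0
  | x :: xs => if x = v then pvCnt v xs + 1 else 0

-- the natural recursive characterisation of maximal runs
def pvRunsSpec : List Int → List (Int × Int)
  | [] => []
  | x :: t => (x, ((1 + pvCnt x t : Nat) : Int)) :: pvRunsSpec (t.drop (pvCnt x t))
termination_by l => l.length
decreasing_by simp only [List.length_drop, List.length_cons]; omega

-- A's row scan, abstracted to the list it scans
def pvHasRun (k : Int) : List Int → Bool
  | [] => false
  | x :: t =>
      if x = 0 then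
        (if k ≤ ((1 + pvCnt 0 t : Nat) : Int) then true else pvHasRun k (t.drop (pvCnt 0 t)))
      else pvHasRun k t
termination_by l => l.length
decreasing_by all_goals (simp only [List.length_drop, List.length_cons]; omega)

theorem pvRunsSpec_nil : pvRunsSpec [] = [] := by rw [pvRunsSpec]

theorem pvRunsSpec_cons (x : Int) (t : List Int) :
    pvRunsSpec (x :: t) = (x, ((1 + pvCnt x t : Nat) : Int)) :: pvRunsSpec (t.drop (pvCnt x t)) := by
  rw [pvRunsSpec]

theorem pvHasRun_nil (k : Int) : pvHasRun k [] = false := by rw [pvHasRun]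

theorem pvHasRun_cons (k x : Int) (t : List Int) :
    pvHasRun k (x :: t)
      = if x = 0 then
          (if k ≤ ((1 + pvCnt 0 t : Nat) : Int) then true else pvHasRun k (t.drop (pvCnt 0 t)))
        else pvHasRun k t := by
  rw [pvHasRun]

theorem pvRunsB_loop (xs : List Int) (rs : List (Int × Int)) (v : Int) (n : Int) :
    xs.foldl (fun out x =>
      match out.getLast? with
      | some p => if p.1 = x then out.dropLast ++ [(x, p.2 + 1)] else out ++ [(x, 1)]
      | none => out ++ [(x, 1)]) (rs ++ [(v, n)])
    = rs ++ [(v, n + (pvCnt v xs : Int))] ++ pvRunsSpec (xs.drop (pvCnt v xs)) := by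
  induction xs generalizing rs v n with
  | nil =>
    simp only [List.foldl_nil, pvCnt, List.drop_zero, pvRunsSpec_nil]
    simp
  | cons x t ih =>
    simp only [List.foldl_cons, List.getLast?_concat]
    by_cases hv : v = x
    · subst hv
      rw [if_pos rfl, List.dropLast_concat, ih rs v (n + 1)]
      have hc : pvCnt v (v :: t) = pvCnt v t + 1 := by simp [pvCnt]
      rw [hc, List.drop_succ_cons]
      have e : n + 1 + (pvCnt v t : Int) = n + ((pvCnt v t + 1 : Nat) : Int) := by push_cast; ring
      rw [e]
    · rw [if_neg hv, ih (rs ++ [(v, n)]) x 1]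
      have hv' : ¬ x = v := fun h => hv h.symm
      have hc : pvCnt v (x :: t) = 0 := by simp [pvCnt, hv']
      rw [hc, List.drop_zero, pvRunsSpec_cons]
      push_cast
      simp

theorem pvRunsB_eq (xs : List Int) : pvRunsB xs = pvRunsSpec xs := by
  cases xs with
  | nil => rw [pvRunsSpec_nil]; rfl
  | cons x t =>
    unfold pvRunsB
    rw [List.foldl_cons]
    refine Eq.trans (pvRunsB_loop t [] x 1) ?_
    rw [pvRunsSpec_cons]
    push_cast
    simp

theorem hasRun_drop_cnt (k x : Int) (t : List Int) (hx : x ≠ 0) :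
    pvHasRun k (t.drop (pvCnt x t)) = pvHasRun k t := by
  induction t with
  | nil => simp [pvCnt]
  | cons y t' ih =>
    by_cases hy : y = x
    · have hc : pvCnt x (y :: t') = pvCnt x t' + 1 := by simp [pvCnt, hy]
      rw [hc, List.drop_succ_cons, ih, pvHasRun_cons, if_neg (by rw [hy]; exact hx)]
    · have hc : pvCnt x (y :: t') = 0 := by simp [pvCnt, hy]
      rw [hc, List.drop_zero]

theorem any_runsSpec (k : Int) (xs : List Int) :
    (pvRunsSpec xs).any (fun r => r.1 == 0 && decide (k ≤ r.2)) = pvHasRun k xs := by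
  cases xs with
  | nil => rw [pvRunsSpec_nil, pvHasRun_nil]; rfl
  | cons x t =>
    rw [pvRunsSpec_cons, pvHasRun_cons, List.any_cons]
    by_cases hx : x = 0
    · subst hx
      rw [if_pos rfl, any_runsSpec k (t.drop (pvCnt 0 t))]
      simp
    · rw [if_neg hx, any_runsSpec k (t.drop (pvCnt x t)), hasRun_drop_cnt k x t hx]
      simp [hx]
termination_by xs.length
decreasing_by all_goals (simp only [List.length_drop, List.length_cons]; omega)

theorem pvZerosA_spec (row : List Int) (w : Nat) (h : w ≤ row.length) :
    ∀ (fuel j c : Nat), w ≤ fuel + j →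
      pvZerosA row w fuel j c
        = (j + pvCnt 0 ((row.take w).drop j), c + pvCnt 0 ((row.take w).drop j)) := by
  intro fuel
  induction fuel with
  | zero =>
    intro j c hf
    have hnil : (row.take w).drop j = [] :=
      List.drop_eq_nil_of_le (by simp [List.length_take]; omega)
    simp only [pvZerosA]
    rw [hnil]
    simp [pvCnt]
  | succ fuel ih =>
    intro j c hf
    simp only [pvZerosA]
    by_cases hcnd : j < w ∧ row.getD j 0 = 0
    · obtain ⟨hj, hz⟩ := hcnd
      have hjr : j < row.length := by omega
      have hjt : j < (row.take w).length := by simp [List.length_take]; omega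
      have hd : (row.take w).drop j = row[j] :: (row.take w).drop (j + 1) := by
        rw [List.drop_eq_getElem_cons hjt, List.getElem_take]
      have hz' : row[j] = 0 := by rw [← List.getD_eq_getElem row 0 hjr]; exact hz
      have hd0 : (row.take w).drop j = 0 :: (row.take w).drop (j + 1) := by rw [hd, hz']
      rw [if_pos ⟨hj, hz⟩, ih (j + 1) (c + 1) (by omega), hd0]
      have hc : pvCnt 0 ((0 : Int) :: (row.take w).drop (j + 1))
          = pvCnt 0 ((row.take w).drop (j + 1)) + 1 := by simp [pvCnt]
      rw [hc]
      simp only [Prod.mk.injEq]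
      omega
    · rw [if_neg hcnd]
      by_cases hj : j < w
      · have hjr : j < row.length := by omega
        have hjt : j < (row.take w).length := by simp [List.length_take]; omega
        have hd : (row.take w).drop j = row[j] :: (row.take w).drop (j + 1) := by
          rw [List.drop_eq_getElem_cons hjt, List.getElem_take]
        have hz : ¬ row.getD j 0 = 0 := by tauto
        have hz' : ¬ row[j] = 0 := by rw [← List.getD_eq_getElem row 0 hjr]; exact hz
        rw [hd]
        have hc : pvCnt 0 (row[j] :: (row.take w).drop (j + 1)) = 0 := by simp [pvCnt, hz']
        rw [hc]
        simp
      · have hnil : (row.take w).drop j = [] :=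
          List.drop_eq_nil_of_le (by simp [List.length_take]; omega)
        rw [hnil]
        simp [pvCnt]

theorem pvRowA_spec (row : List Int) (w : Nat) (k : Int) (h : w ≤ row.length) :
    ∀ (fuel j : Nat), w < fuel + j →
      pvRowA row w k fuel j = pvHasRun k ((row.take w).drop j) := by
  intro fuel
  induction fuel with
  | zero =>
    intro j hf
    have hnil : (row.take w).drop j = [] :=
      List.drop_eq_nil_of_le (by simp [List.length_take]; omega)
    simp only [pvRowA]
    rw [hnil, pvHasRun_nil]
  | succ fuel ih =>
    intro j hf
    simp only [pvRowA]
    by_cases hj : j < w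
    · have hjr : j < row.length := by omega
      have hjt : j < (row.take w).length := by simp [List.length_take]; omega
      have hd : (row.take w).drop j = row[j] :: (row.take w).drop (j + 1) := by
        rw [List.drop_eq_getElem_cons hjt, List.getElem_take]
      rw [if_pos hj]
      by_cases hz : row.getD j 0 = 0
      · have hz' : row[j] = 0 := by rw [← List.getD_eq_getElem row 0 hjr]; exact hz
        have hd0 : (row.take w).drop j = 0 :: (row.take w).drop (j + 1) := by rw [hd, hz']
        rw [if_pos hz, pvZerosA_spec row w h w j 0 (by omega), hd0]
        have hc : pvCnt 0 ((0 : Int) :: (row.take w).drop (j + 1))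
            = pvCnt 0 ((row.take w).drop (j + 1)) + 1 := by simp [pvCnt]
        rw [hc, pvHasRun_cons, if_pos rfl]
        have e1 : 0 + (pvCnt 0 ((row.take w).drop (j + 1)) + 1)
            = 1 + pvCnt 0 ((row.take w).drop (j + 1)) := by omega
        rw [e1, ih (j + (pvCnt 0 ((row.take w).drop (j + 1)) + 1)) (by omega)]
        have e2 : (row.take w).drop (j + (pvCnt 0 ((row.take w).drop (j + 1)) + 1))
            = ((row.take w).drop (j + 1)).drop (pvCnt 0 ((row.take w).drop (j + 1))) := by
          rw [List.drop_drop]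
          congr 1
          omega
        rw [e2]
      · have hz' : ¬ row[j] = 0 := by rw [← List.getD_eq_getElem row 0 hjr]; exact hz
        rw [if_neg hz, hd, pvHasRun_cons, if_neg hz']
        exact ih (j + 1) (by omega)
    · rw [if_neg hj]
      have hnil : (row.take w).drop j = [] :=
        List.drop_eq_nil_of_le (by simp [List.length_take]; omega)
      rw [hnil, pvHasRun_nil]

theorem row_eq (row : List Int) (w : Nat) (k : Int) (h : w ≤ row.length) :
    pvRowA row w k (w + 1) 0
      = (pvRunsB (List.take w row)).any (fun r => r.1 == 0 && decide (k ≤ r.2)) := by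
  rw [pvRunsB_eq, any_runsSpec]
  have := pvRowA_spec row w k h (w + 1) 0 (by omega)
  rwa [List.drop_zero] at this

-- ===== VERDICT (by name: the statement is the Claim_ definition above) =====
theorem find_free_place_for_f_spec : Claim_equal_find_free_place_for_f := by
  intro a k _ hpre
  unfold Spec_find_free_place_for_f find_free_place_for_f find_free_place_for_f_alt
  cases a with
  | nil =>
    rw [PySem.List.pyRange_one_eq_nil (by simp), PySem.List.enumerate_nil]
    rfl
  | cons r t =>
    rw [PySem.List.enumerate_eq_map_pyRange (r :: t) [], List.foldl_map]
    have hlen : PySem.List.len (r :: t) = (((r :: t).length : Nat) : Int) := by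
      simp [PySem.List.len]
    rw [hlen]
    apply PySem.List.foldl_congr_mem
    intro acc i hi
    dsimp only
    rw [PySem.List.mem_pyRange_one] at hi
    rw [PySem.List.pyGetD_eq_getElem (r :: t) [] hi.1 hi.2]
    rw [PySem.List.pyGetD_zero_cons]
    rw [PySem.List.slice_to_natCast]
    have hmem : (r :: t)[i.toNat] ∈ (r :: t) := List.getElem_mem _
    have hle := hpre _ hmem
    simp only [List.headD_cons] at hle
    rw [row_eq _ r.length k hle]
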